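-- pv_equiv track=rewrite | github.com/mtuit/aoc | 2020/day14.py | get_masks_generator
-- ===== SOURCE A (Python) =====
-- def get_masks_generator(mask):
--     if not mask:
--         yield ''
--         return
--     else:
--         for msk in get_masks_generator(mask[1:]):
--             if mask[0] == 'X':
--                 yield '0' + msk
--                 yield '1' + msk
--             elif mask[0] == '1':
--                 yield '1' + msk
--             elif mask[0] == '0':
--                 yield 'X' + msk
-- ===== SOURCE B (Python) =====
-- import itertools
--
-- def get_masks_generator(mask):
--     # One options-tuple per mask character, then a single product over them.
--     opts = [('0', '1') if c == 'X' else ('1',) if c == '1' else ('X',) if c == '0' else () for c in mask]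
--     for combo in itertools.product(*reversed(opts)):
--         yield ''.join(reversed(combo))
-- ===== Notes on version B (the rewrite author's own statement) =====
-- stated objective: idiomatic
-- what changed: Replaced the per-character recursive generator with a single itertools.product pass over a precomputed options list (reversed to keep the leading-character-fastest emission order).
import Mathlib
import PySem

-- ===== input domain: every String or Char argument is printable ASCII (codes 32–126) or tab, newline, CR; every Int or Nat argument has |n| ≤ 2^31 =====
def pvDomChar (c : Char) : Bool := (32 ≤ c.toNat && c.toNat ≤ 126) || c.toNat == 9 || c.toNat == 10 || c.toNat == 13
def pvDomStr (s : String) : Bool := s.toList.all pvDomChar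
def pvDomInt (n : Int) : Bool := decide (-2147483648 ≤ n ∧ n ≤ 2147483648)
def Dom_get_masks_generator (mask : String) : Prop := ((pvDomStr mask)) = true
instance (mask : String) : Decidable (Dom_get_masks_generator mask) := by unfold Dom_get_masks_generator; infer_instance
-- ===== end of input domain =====

-- B replaces A's recursive generator by one itertools.product pass over a precomputed
-- options list (idiomatic); return values proved equal, B is a generator like A.

-- ===== PORT A =====
-- A's recursion over the mask, on the character list; the generator's yields collected in order.
def pvGoA : List Char → List (List Char)
  | [] => [[]]
  | c :: rest =>
      (pvGoA rest).flatMap (fun msk =>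
        if c = 'X' then ['0' :: msk, '1' :: msk]
        else if c = '1' then ['1' :: msk]
        else if c = '0' then ['X' :: msk]
        else [])

def get_masks_generator (mask : String) : List String :=
  (pvGoA mask.toList).map String.ofList

-- ===== PORT B =====
-- options tuple per character, as in Source B
def pvOptOf (c : Char) : List Char :=
  if c = 'X' then ['0', '1'] else if c = '1' then ['1'] else if c = '0' then ['X'] else []

-- itertools.product over a list of option lists (first list varies slowest, as in Python)
def pvProduct : List (List Char) → List (List Char)
  | [] => [[]]
  | o :: os => o.flatMap (fun x => (pvProduct os).map (x :: ·))

def get_masks_generator_alt (mask : String) : List String :=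
  (pvProduct ((mask.toList.map pvOptOf).reverse)).map (fun combo => String.ofList combo.reverse)

-- ===== PRECONDITION & SPEC =====
def Spec_get_masks_generator (mask : String) (out : List String) : Prop := out = get_masks_generator_alt mask
instance (mask : String) (out : List String) : Decidable (Spec_get_masks_generator mask out) := by unfold Spec_get_masks_generator; infer_instance

-- ===== CLAIM (what is proved, stated in full; the proofs are below) =====
def Claim_equal_get_masks_generator : Prop := ∀ (mask : String), Dom_get_masks_generator mask → Spec_get_masks_generator mask (get_masks_generator mask)

-- ===== LEMMAS AND PROOFS =====
theorem pvProduct_append_singleton (xs : List (List Char)) (o : List Char) :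
    pvProduct (xs ++ [o]) = (pvProduct xs).flatMap (fun t => o.map (fun x => t ++ [x])) := by
  induction xs with
  | nil => induction o <;> simp_all [pvProduct, List.flatMap]
  | cons x0 xs ih =>
      simp only [List.cons_append, pvProduct, ih, List.map_flatMap, List.flatMap_map,
        List.flatMap_assoc]
      congr 1; funext a
      simp [Function.comp_def]

theorem pvB_eq_A (cs : List Char) :
    (pvProduct ((cs.map pvOptOf).reverse)).map List.reverse = pvGoA cs := by
  induction cs with
  | nil => simp [pvProduct, pvGoA]
  | cons c rest ih =>
      simp only [List.map_cons, List.reverse_cons, pvProduct_append_singleton,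
        List.map_flatMap, pvGoA]
      rw [← ih, List.flatMap_map]
      congr 1; funext t
      simp only [List.map_map]
      by_cases hX : c = 'X'
      · simp [hX, pvOptOf]
      · by_cases h1 : c = '1'
        · simp [h1, pvOptOf]
        · by_cases h0 : c = '0'
          · simp [h0, pvOptOf]
          · simp [hX, h1, h0, pvOptOf]

-- ===== VERDICT (by name: the statement is the Claim_ definition above) =====
theorem get_masks_generator_spec : Claim_equal_get_masks_generator := by
  intro mask _
  unfold Spec_get_masks_generator get_masks_generator get_masks_generator_alt
  rw [← pvB_eq_A mask.toList, List.map_map]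
  rfl
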